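-- pv_equiv track=rewrite | github.com/cy-suite/paddlepaddle-new | test/legacy_test/op_test.py | lod_has_continuous_zero
-- ===== SOURCE A (Python) =====
-- def lod_has_continuous_zero(lod):
--     for i in range(len(lod) - 3):
--         if (
--             lod[i] != 0
--             and lod[i + 1] == 0
--             and lod[i + 2] == 0
--             and lod[i + 3] != 0
--         ):
--             return True
--     return False
-- ===== SOURCE B (Python) =====
-- def lod_has_continuous_zero(lod):
--     run = 0
--     prev_nonzero = False
--     for x in lod:
--         if x == 0:
--             run += 1
--         else:
--             if prev_nonzero and run == 2:
--                 return True
--             prev_nonzero = True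
--             run = 0
--     return False
-- ===== Notes on version B (the rewrite author's own statement) =====
-- stated objective: alternative
-- what changed: Replaces the 4-wide sliding-window index scan with a single element-wise pass that tracks the length of the current consecutive-zero run and whether it was preceded by a nonzero, succeeding when a nonzero closes a run of exactly 2.
import Mathlib
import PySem

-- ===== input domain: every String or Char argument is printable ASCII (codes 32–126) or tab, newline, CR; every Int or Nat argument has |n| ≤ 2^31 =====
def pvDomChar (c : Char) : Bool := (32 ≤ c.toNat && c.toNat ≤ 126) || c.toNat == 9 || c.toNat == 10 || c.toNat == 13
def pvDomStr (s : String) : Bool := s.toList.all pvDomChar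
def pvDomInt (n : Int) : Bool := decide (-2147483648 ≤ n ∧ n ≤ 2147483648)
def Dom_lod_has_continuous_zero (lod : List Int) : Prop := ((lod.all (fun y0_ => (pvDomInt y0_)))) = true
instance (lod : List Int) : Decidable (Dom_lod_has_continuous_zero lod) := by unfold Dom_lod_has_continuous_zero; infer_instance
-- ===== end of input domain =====

-- B replaces A's 4-wide sliding-window index scan by a single pass tracking the current
-- consecutive-zero run length; an alternative decomposition of the same O(n) task.

-- ===== PORT A =====
-- every index i, i+1, i+2, i+3 accessed is in range (i < len-3), so pyGetD is exact here
def lod_has_continuous_zero (lod : List Int) : Bool :=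
  (PySem.List.pyRange 0 ((lod.length : Int) - 3) 1).any (fun i =>
    decide (PySem.List.pyGetD lod i 0 ≠ 0) &&
    decide (PySem.List.pyGetD lod (i + 1) 0 = 0) &&
    decide (PySem.List.pyGetD lod (i + 2) 0 = 0) &&
    decide (PySem.List.pyGetD lod (i + 3) 0 ≠ 0))

-- ===== PORT B =====
-- loop state: run = length of current consecutive-zero run, prev = a nonzero preceded it
def pvAltLoop : List Int → Nat → Bool → Bool
  | [], _, _ => false
  | x :: xs, run, prev =>
    if x = 0 then pvAltLoop xs (run + 1) prev
    else if prev && run == 2 then true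
    else pvAltLoop xs 0 true

def lod_has_continuous_zero_alt (lod : List Int) : Bool :=
  pvAltLoop lod 0 false

-- ===== PRECONDITION & SPEC =====
def Spec_lod_has_continuous_zero (lod : List Int) (out : Bool) : Prop := out = lod_has_continuous_zero_alt lod
instance (lod : List Int) (out : Bool) : Decidable (Spec_lod_has_continuous_zero lod out) := by unfold Spec_lod_has_continuous_zero; infer_instance

-- ===== CLAIM (what is proved, stated in full; the proofs are below) =====
def Claim_equal_lod_has_continuous_zero : Prop := ∀ (lod : List Int), Dom_lod_has_continuous_zero lod → Spec_lod_has_continuous_zero lod (lod_has_continuous_zero lod)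

-- ===== LEMMAS AND PROOFS =====

-- common reference form: structural recursion over 4-wide windows
def winA : List Int → Bool
  | a :: b :: c :: d :: rest =>
    (decide (a ≠ 0) && decide (b = 0) && decide (c = 0) && decide (d ≠ 0)) || winA (b :: c :: d :: rest)
  | _ => false

theorem winA_zero_cons (ys : List Int) : winA (0 :: ys) = winA ys := by
  match ys with
  | b :: c :: d :: rest => simp [winA]
  | [] => simp [winA]
  | [b] => simp [winA]
  | [b, c] => simp [winA]

theorem winA_replicate (k : Nat) (ys : List Int) :
    winA (List.replicate k 0 ++ ys) = winA ys := by
  induction k with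
  | zero => simp
  | succ n ih => simpa [List.replicate_succ, winA_zero_cons] using ih

theorem winA_nonzero_head (x y : Int) (ys : List Int) (hx : x ≠ 0) (hy : y ≠ 0) :
    winA (x :: ys) = winA (y :: ys) := by
  match ys with
  | b :: c :: d :: rest => simp [winA, hx, hy]
  | [] => simp [winA]
  | [b] => simp [winA]
  | [b, c] => simp [winA]

theorem winA_one_run (run : Nat) (x : Int) (xs : List Int) (hx : x ≠ 0) (hrun : run ≠ 2) :
    winA ((1 : Int) :: List.replicate run 0 ++ x :: xs) = winA (x :: xs) := by
  match run, hrun with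
  | 0, _ =>
    match xs with
    | b :: c :: rest => simp [winA, hx]
    | [] => simp [winA]
    | [b] => simp [winA]
  | 1, _ =>
    match xs with
    | d :: rest => simp [winA, hx, winA_zero_cons]
    | [] => simp [winA]
  | (r + 3), _ =>
    have h3 : List.replicate (r + 3) (0 : Int) ++ x :: xs
        = 0 :: 0 :: 0 :: (List.replicate r 0 ++ x :: xs) := by
      simp [List.replicate_succ]
    rw [List.cons_append, h3]
    simp only [winA]
    simp [winA_replicate r (x :: xs), winA_zero_cons]

theorem pvAltLoop_eq_winA (xs : List Int) : ∀ (run : Nat) (prev : Bool),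
    pvAltLoop xs run prev
      = winA ((if prev then [(1 : Int)] else []) ++ (List.replicate run 0 ++ xs)) := by
  induction xs with
  | nil =>
    intro run prev
    cases prev with
    | false =>
      simpa using (winA_replicate run ([] : List Int)).symm
    | true =>
      show false = winA ((if True then [(1 : Int)] else []) ++ (List.replicate run 0 ++ []))
      match run with
      | 0 => decide
      | 1 => decide
      | 2 => decide
      | (r + 3) =>
        have h3 : (if True then [(1 : Int)] else []) ++ (List.replicate (r + 3) (0 : Int) ++ ([] : List Int))
            = 1 :: 0 :: 0 :: 0 :: (List.replicate r 0 ++ ([] : List Int)) := by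
          simp [List.replicate_succ]
        rw [h3]
        simp only [winA]
        simp only [winA_zero_cons]
        simpa [winA] using winA_replicate r ([] : List Int)
  | cons x xs ih =>
    intro run prev
    by_cases hx : x = 0
    · subst hx
      rw [show pvAltLoop (0 :: xs) run prev = pvAltLoop xs (run + 1) prev from by
        simp [pvAltLoop]]
      rw [ih (run + 1) prev]
      have h : List.replicate (run + 1) (0 : Int) ++ xs
          = List.replicate run 0 ++ 0 :: xs := by
        simp [List.replicate_succ']
      rw [h]
    · rw [show pvAltLoop (x :: xs) run prev
          = (if prev && run == 2 then true else pvAltLoop xs 0 true) from by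
        simp [pvAltLoop, hx]]
      by_cases hpr : prev = true ∧ run = 2
      · obtain ⟨hp, hr⟩ := hpr
        subst hp; subst hr
        simp [winA, hx, List.replicate_succ]
      · have hc : (prev && run == 2) = false := by
          cases prev <;> simp_all
        rw [hc, if_neg (by simp)]
        rw [ih 0 true]
        cases prev with
        | false =>
          have hL : (if (true = true) then [(1 : Int)] else []) ++ (List.replicate 0 (0 : Int) ++ xs) = 1 :: xs := by simp
          have hR : (if (false = true) then [(1 : Int)] else []) ++ (List.replicate run (0 : Int) ++ x :: xs)
              = List.replicate run 0 ++ x :: xs := by simp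
          rw [hL, hR, winA_replicate run (x :: xs)]
          exact winA_nonzero_head 1 x xs one_ne_zero hx
        | true =>
          have hrun : run ≠ 2 := fun h => hpr ⟨rfl, h⟩
          have hL : (if (true = true) then [(1 : Int)] else []) ++ (List.replicate 0 (0 : Int) ++ xs) = 1 :: xs := by simp
          have hR : (if (true = true) then [(1 : Int)] else []) ++ (List.replicate run (0 : Int) ++ x :: xs)
              = (1 : Int) :: List.replicate run 0 ++ x :: xs := by simp
          rw [hL, hR, winA_one_run run x xs hx hrun]
          exact winA_nonzero_head 1 x xs one_ne_zero hx

-- A-side: the pyRange/pyGetD scan restated over Nat indices, then relate it to winA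
theorem A_eq_rangeNat (lod : List Int) :
    lod_has_continuous_zero lod
      = (List.range (lod.length - 3)).any (fun k =>
          decide (lod.getD k 0 ≠ 0) && decide (lod.getD (k + 1) 0 = 0) &&
          decide (lod.getD (k + 2) 0 = 0) && decide (lod.getD (k + 3) 0 ≠ 0)) := by
  unfold lod_has_continuous_zero
  rw [PySem.List.pyRange_one]
  have ht : (((lod.length : Int)) - 3 - 0).toNat = lod.length - 3 := by omega
  rw [ht, List.any_map]
  congr 1
  funext k
  have e0 : (0 : Int) + (k : Int) = ((k : Nat) : Int) := by ring
  have f1 : ((k : Int) + 1) = ((k + 1 : Nat) : Int) := by push_cast; ring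
  have f2 : ((k : Int) + 2) = ((k + 2 : Nat) : Int) := by push_cast; ring
  have f3 : ((k : Int) + 3) = ((k + 3 : Nat) : Int) := by push_cast; ring
  simp only [Function.comp, e0, f1, f2, f3, PySem.List.pyGetD_natCast]

theorem A_eq_winA (lod : List Int) : lod_has_continuous_zero lod = winA lod := by
  induction lod with
  | nil => rw [A_eq_rangeNat]; simp [winA]
  | cons a xs ih =>
    cases xs with
    | nil => rw [A_eq_rangeNat]; simp [winA]
    | cons b xs =>
      cases xs with
      | nil => rw [A_eq_rangeNat]; simp [winA]
      | cons c xs =>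
        cases xs with
        | nil => rw [A_eq_rangeNat]; simp [winA]
        | cons d rest =>
          rw [A_eq_rangeNat] at ih ⊢
          have hw : winA (a :: b :: c :: d :: rest)
              = ((decide (a ≠ 0) && decide (b = 0) && decide (c = 0) && decide (d ≠ 0))
                  || winA (b :: c :: d :: rest)) := rfl
          rw [hw, ← ih]
          have hlen : (a :: b :: c :: d :: rest).length - 3
              = ((b :: c :: d :: rest).length - 3) + 1 := by
            simp
          rw [hlen, List.range_succ_eq_map, List.any_cons, List.any_map]
          refine congrArg₂ (· || ·) ?_ ?_
          · rfl
          · exact congrArg _ (funext fun k => rfl)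

-- ===== VERDICT (by name: the statement is the Claim_ definition above) =====
theorem lod_has_continuous_zero_spec : Claim_equal_lod_has_continuous_zero := by
  intro lod _
  show lod_has_continuous_zero lod = lod_has_continuous_zero_alt lod
  rw [A_eq_winA]
  unfold lod_has_continuous_zero_alt
  rw [pvAltLoop_eq_winA]
  simp
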